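-- pv_equiv track=rewrite | github.com/ZXXZ1000/LATRACE-AI | modules/memory/session_write.py | _merge_forget_policy
-- ===== SOURCE A (Python) =====
-- from typing import Any, Callable, Dict, List, Optional, Sequence
--
-- def _merge_forget_policy(policies: Sequence[Optional[str]]) -> Optional[str]:
--     vals = {str(x).strip() for x in policies if x is not None and str(x).strip()}
--     if "until_changed" in vals:
--         return "until_changed"
--     if "permanent" in vals:
--         return "permanent"
--     if vals:
--         return "temporary"
--     return None
-- ===== SOURCE B (Python) =====
-- from typing import Optional, Sequence
--
-- _RANK = {"until_changed": 3, "permanent": 2}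
-- _NAME = {3: "until_changed", 2: "permanent", 1: "temporary"}
--
-- def _merge_forget_policy(policies: Sequence[Optional[str]]) -> Optional[str]:
--     ranks = [_RANK.get(str(x).strip(), 1)
--              for x in policies
--              if x is not None and str(x).strip()]
--     if not ranks:
--         return None
--     return _NAME[max(ranks)]
-- ===== Notes on version B (the rewrite author's own statement) =====
-- stated objective: alternative
-- what changed: Replaces the set comprehension plus three priority-ordered membership queries by mapping each cleaned value to a numeric priority rank (until_changed=3, permanent=2, other=1), taking the maximum rank, and translating the maximum back to its policy name.
import Mathlib
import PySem

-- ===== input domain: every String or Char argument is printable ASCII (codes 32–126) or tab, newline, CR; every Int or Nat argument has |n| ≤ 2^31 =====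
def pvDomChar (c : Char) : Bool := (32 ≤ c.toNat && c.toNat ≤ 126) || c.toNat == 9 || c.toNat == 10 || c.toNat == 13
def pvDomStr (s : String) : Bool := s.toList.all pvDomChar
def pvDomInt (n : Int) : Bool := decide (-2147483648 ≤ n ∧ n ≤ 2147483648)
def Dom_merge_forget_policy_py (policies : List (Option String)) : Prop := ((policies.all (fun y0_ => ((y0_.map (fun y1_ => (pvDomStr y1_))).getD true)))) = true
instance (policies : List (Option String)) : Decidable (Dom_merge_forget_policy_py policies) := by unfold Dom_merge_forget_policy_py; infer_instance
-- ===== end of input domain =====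

-- B maps each cleaned value to a numeric priority rank, takes the maximum rank and translates it
-- back to a policy name, instead of A's set plus priority-ordered membership queries (objective: alternative).

-- ===== PORT A =====
-- the set comprehension: filter None, strip, filter empty, collect distinct values
def pvStepA (s : PySem.Set String) (x : Option String) : PySem.Set String :=
  match x with
  | none => s
  | some v =>
    let t := PySem.Str.strip v
    if t = "" then s else PySem.Set.add s t

def merge_forget_policy_py (policies : List (Option String)) : Option String :=
  let vals := policies.foldl pvStepA PySem.Set.empty
  if PySem.Set.contains vals "until_changed" then some "until_changed"
  else if PySem.Set.contains vals "permanent" then some "permanent"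
  else if vals.isEmpty then none
  else some "temporary"

-- ===== PORT B =====
-- _RANK.get(t, 1): dict literal lookup, ported as the equivalent if-chain on the two keys
def pvRank (t : String) : Int :=
  if t = "until_changed" then 3 else if t = "permanent" then 2 else 1

def merge_forget_policy_py_alt (policies : List (Option String)) : Option String :=
  let ranks := policies.filterMap (fun x =>
    match x with
    | none => none
    | some v =>
      let t := PySem.Str.strip v
      if t = "" then none else some (pvRank t))
  match ranks with
  | [] => none
  | r :: rs =>
    -- max(ranks); _NAME[m] ported as the if-chain on the three keys
    let m := rs.foldl max r
    if m = 3 then some "until_changed" else if m = 2 then some "permanent" else some "temporary"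

-- ===== PRECONDITION & SPEC =====
def Spec_merge_forget_policy_py (policies : List (Option String)) (out : Option String) : Prop := out = merge_forget_policy_py_alt policies
instance (policies : List (Option String)) (out : Option String) : Decidable (Spec_merge_forget_policy_py policies out) := by unfold Spec_merge_forget_policy_py; infer_instance

-- ===== CLAIM =====
def Claim_equal_merge_forget_policy_py : Prop := ∀ (policies : List (Option String)), Dom_merge_forget_policy_py policies → Spec_merge_forget_policy_py policies (merge_forget_policy_py policies)

-- ===== LEMMAS AND PROOFS =====

-- the cleaned values, in order (shared characterisation of both programs)
def pvClean (policies : List (Option String)) : List String :=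
  policies.filterMap (fun x =>
    match x with
    | none => none
    | some v =>
      let t := PySem.Str.strip v
      if t = "" then none else some t)

theorem pvClean_none (xs : List (Option String)) : pvClean (none :: xs) = pvClean xs := rfl

theorem pvClean_blank (v : String) (xs : List (Option String)) (he : PySem.Str.strip v = "") :
    pvClean (some v :: xs) = pvClean xs := by simp [pvClean, he]

theorem pvClean_cons (v : String) (xs : List (Option String)) (he : ¬ PySem.Str.strip v = "") :
    pvClean (some v :: xs) = PySem.Str.strip v :: pvClean xs := by simp [pvClean, he]

theorem mem_foldl_stepA (policies : List (Option String)) (s : PySem.Set String) (a : String) :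
    a ∈ policies.foldl pvStepA s ↔ a ∈ s ∨ a ∈ pvClean policies := by
  induction policies generalizing s with
  | nil => simp [pvClean]
  | cons x xs ih =>
    cases x with
    | none =>
      simp only [List.foldl_cons, pvClean_none]
      rw [show pvStepA s none = s from rfl, ih]
    | some v =>
      simp only [List.foldl_cons]
      by_cases he : PySem.Str.strip v = ""
      · rw [show pvStepA s (some v) = s by simp [pvStepA, he], ih, pvClean_blank v xs he]
      · rw [show pvStepA s (some v) = PySem.Set.add s (PySem.Str.strip v) by
          simp [pvStepA, he], ih, pvClean_cons v xs he]
        simp only [PySem.Set.mem_add, List.mem_cons, or_assoc]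

theorem isEmpty_foldl_stepA (policies : List (Option String)) (s : PySem.Set String) :
    (policies.foldl pvStepA s).isEmpty = (s.isEmpty && (pvClean policies).isEmpty) := by
  induction policies generalizing s with
  | nil => simp [pvClean]
  | cons x xs ih =>
    cases x with
    | none =>
      simp only [List.foldl_cons]
      rw [show pvStepA s none = s from rfl]
      simp [ih, pvClean]
    | some v =>
      simp only [List.foldl_cons]
      by_cases he : PySem.Str.strip v = ""
      · rw [show pvStepA s (some v) = s by simp [pvStepA, he]]
        simp [ih, pvClean, he]
      · rw [show pvStepA s (some v) = PySem.Set.add s (PySem.Str.strip v) by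
          simp [pvStepA, he]]
        have hne : (PySem.Set.add s (PySem.Str.strip v)).isEmpty = false := by
          have hm : PySem.Str.strip v ∈ PySem.Set.add s (PySem.Str.strip v) :=
            (PySem.Set.mem_add _ _ _).mpr (Or.inr rfl)
          simpa [List.isEmpty_iff] using List.ne_nil_of_mem hm
        simp [ih, pvClean, he, hne]

-- the shared value: priority decision from the cleaned list
def pvG (L : List String) : Int :=
  if "until_changed" ∈ L then 3 else if "permanent" ∈ L then 2 else 1

theorem pvRank_ge_one (t : String) : 1 ≤ pvRank t := by
  unfold pvRank; split_ifs <;> norm_num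

theorem max_rank_G (t : String) (rest : List String) :
    max (pvRank t) (pvG rest) = pvG (t :: rest) := by
  by_cases hu : t = "until_changed"
  · subst hu
    by_cases hur : "until_changed" ∈ rest <;> by_cases hpr : "permanent" ∈ rest <;>
      simp [pvRank, pvG, hur, hpr]
  · by_cases hp : t = "permanent"
    · subst hp
      by_cases hur : "until_changed" ∈ rest <;> by_cases hpr : "permanent" ∈ rest <;>
        simp [pvRank, pvG, hur, hpr]
    · have hu' : ¬ ("until_changed" = t) := fun h => hu h.symm
      have hp' : ¬ ("permanent" = t) := fun h => hp h.symm
      by_cases hur : "until_changed" ∈ rest <;> by_cases hpr : "permanent" ∈ rest <;>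
        simp [pvRank, pvG, hu, hp, hu', hp', hur, hpr]

theorem foldl_max_rank (L : List String) (r : Int) (hr : 1 ≤ r) :
    (L.map pvRank).foldl max r = max r (pvG L) := by
  induction L generalizing r with
  | nil =>
    have : pvG [] = 1 := by simp [pvG]
    simp only [List.map_nil, List.foldl_nil, this]
    exact (max_eq_left hr).symm
  | cons t rest ih =>
    simp only [List.map_cons, List.foldl_cons]
    rw [ih (max r (pvRank t)) (le_trans hr (le_max_left _ _)), max_assoc, max_rank_G]

theorem ranks_eq_map (policies : List (Option String)) :
    policies.filterMap (fun x =>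
      match x with
      | none => none
      | some v =>
        let t := PySem.Str.strip v
        if t = "" then none else some (pvRank t)) = (pvClean policies).map pvRank := by
  induction policies with
  | nil => rfl
  | cons x xs ih =>
    cases x with
    | none => simpa [pvClean] using ih
    | some v =>
      by_cases he : PySem.Str.strip v = "" <;>
        simp [pvClean, he] at * <;> simpa [pvClean] using ih

theorem alt_eq_G (policies : List (Option String)) :
    merge_forget_policy_py_alt policies =
      (if (pvClean policies).isEmpty then none
       else if pvG (pvClean policies) = 3 then some "until_changed"
       else if pvG (pvClean policies) = 2 then some "permanent"
       else some "temporary") := by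
  unfold merge_forget_policy_py_alt
  rw [ranks_eq_map]
  rcases hL : pvClean policies with _ | ⟨t, rest⟩
  · simp
  · simp only [List.map_cons, List.isEmpty_cons]
    rw [foldl_max_rank rest (pvRank t) (pvRank_ge_one t), max_rank_G]
    rfl

-- ===== VERDICT =====
theorem merge_forget_policy_py_spec : Claim_equal_merge_forget_policy_py := by
  intro policies _
  show merge_forget_policy_py policies = merge_forget_policy_py_alt policies
  rw [alt_eq_G]
  unfold merge_forget_policy_py
  have hmemU := mem_foldl_stepA policies PySem.Set.empty "until_changed"
  have hmemP := mem_foldl_stepA policies PySem.Set.empty "permanent"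
  have hemp := isEmpty_foldl_stepA policies PySem.Set.empty
  simp only [PySem.Set.empty] at hmemU hmemP hemp
  by_cases hu : "until_changed" ∈ pvClean policies <;>
    by_cases hp : "permanent" ∈ pvClean policies <;>
    by_cases he : (pvClean policies).isEmpty
  all_goals
    (first
      | (exfalso; rw [List.isEmpty_iff] at he; simp [he] at hu hp; done)
      | (simp_all [PySem.Set.contains, pvG, List.isEmpty_iff]))
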